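-- pv_equiv track=rewrite | github.com/devExcale/acsai-homework-y1 | HW8-req/program01.py | pattern_none
-- ===== SOURCE A (Python) =====
-- def pattern_none(image: list, colours: list, slider: int = -1) -> list:
-- 	"""
--
-- 	Extends the image by 1 pixel, using the provided colours
-- 	and **no** pattern.
--
-- 	:param slider:
-- 	:param image: A list of lists, which is the image matrix
-- 	:param colours: A list of colours
-- 	:return: A list with all the possible images
-- 	"""
--
-- 	new_images = []
--
-- 	if slider == 0:
-- 		new_image = [list(row) for row in image]
-- 		for row in new_image:
-- 			row.append(-1)
-- 		new_image.append([-1 for _ in range(len(image) + 1)])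
-- 		new_images.append(new_image)
--
-- 	elif slider < 0:		# function entry point
-- 		return list(map(lambda img: tuple(map(tuple, img)), pattern_none(image, colours, len(image) * 2 + 1)))
--
-- 	else:
-- 		images = pattern_none(image, colours, slider - 1)
-- 		side = len(images[0])
--
-- 		if slider < side:
-- 			for img in images:
-- 				for colour in colours:
-- 					new_image = [row.copy() for row in img]
-- 					new_image[slider - 1][side - 1] = colour
-- 					new_images.append(new_image)
-- 		else:
-- 			for img in images:
-- 				for colour in colours:
-- 					new_image = [row.copy() for row in img]
-- 					new_image[side - 1][slider - side] = colour
-- 					new_images.append(new_image)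
--
-- 	return new_images
-- ===== SOURCE B (Python) =====
-- def pattern_none(image: list, colours: list, slider: int = -1) -> list:
-- 	"""Same result as A, by direct mixed-radix enumeration instead of
-- 	level-by-level recursion: each output index idx is decoded in base
-- 	len(colours) (slider position 1 most significant) and the colours are
-- 	written straight onto a fresh copy of the base extended image."""
-- 	n = len(image)
-- 	base = [list(row) + [-1] for row in image] + [[-1] * (n + 1)]
-- 	if slider == 0:
-- 		return [base]
-- 	coords = [(s, n) for s in range(n)] + [(n, c) for c in range(n + 1)]
-- 	m = 2 * n + 1 if slider < 0 else slider
-- 	k = len(colours)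
-- 	out = []
-- 	for idx in range(k ** m):
-- 		img = [row.copy() for row in base]
-- 		rem = idx
-- 		for j in range(m - 1, -1, -1):
-- 			r, c = coords[j]
-- 			img[r][c] = colours[rem % k]
-- 			rem //= k
-- 		out.append(tuple(map(tuple, img)) if slider < 0 else img)
-- 	return out
-- ===== Notes on version B (the rewrite author's own statement) =====
-- stated objective: alternative
-- what changed: B builds the base extended image and the border-cell coordinate list once, then enumerates the colourings directly by decoding each output index as a base-len(colours) number (slider position 1 most significant) and writing the digit colours straight onto a fresh copy of the base, instead of A's level-by-level recursion that materialises and re-copies every intermediate image list at each of the 2n+1 levels.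
import Mathlib
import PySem

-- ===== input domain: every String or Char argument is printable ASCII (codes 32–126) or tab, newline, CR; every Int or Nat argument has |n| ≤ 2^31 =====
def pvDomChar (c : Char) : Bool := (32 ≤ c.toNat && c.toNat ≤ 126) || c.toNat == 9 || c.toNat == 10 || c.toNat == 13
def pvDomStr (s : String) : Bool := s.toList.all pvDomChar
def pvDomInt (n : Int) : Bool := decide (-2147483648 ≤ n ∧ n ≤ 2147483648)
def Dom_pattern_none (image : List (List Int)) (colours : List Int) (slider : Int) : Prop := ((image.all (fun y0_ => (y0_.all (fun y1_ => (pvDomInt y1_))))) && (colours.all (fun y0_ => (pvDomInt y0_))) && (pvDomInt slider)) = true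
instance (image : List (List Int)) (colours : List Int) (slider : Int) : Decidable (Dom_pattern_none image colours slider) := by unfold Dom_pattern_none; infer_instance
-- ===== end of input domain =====

-- B enumerates the colourings directly by mixed-radix index decoding instead of A's
-- level-by-level recursion; equivalence is proved on exactly the inputs where the Python A returns.

-- shared helper: Python "img[i][j] = colour" on a fresh row-copied image
-- (in range whenever Pre_ holds; List.set's out-of-range no-op is junk outside Pre_)
def pvSet2d (img : List (List Int)) (i j : Nat) (c : Int) : List (List Int) :=
  img.set i ((img.getD i []).set j c)

-- shared helper: the base extended image (A's slider==0 branch / Source B's `base`)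
def pvBase (image : List (List Int)) : List (List Int) :=
  image.map (fun row => row ++ [-1]) ++ [List.replicate (image.length + 1) (-1)]

-- ===== PORT A =====
-- the recursion of A for slider ≥ 0 (slider as a Nat)
def pattern_noneGo (image : List (List Int)) (colours : List Int) : Nat → List (List (List Int))
  | 0 => [pvBase image]
  | s+1 =>
    let images := pattern_noneGo image colours s
    let side := (images.headD []).length        -- len(images[0]); images nonempty under Pre_
    if s + 1 < side then
      images.foldl (fun acc img =>
        colours.foldl (fun acc c => acc ++ [pvSet2d img s (side - 1) c]) acc) []
    else
      images.foldl (fun acc img =>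
        colours.foldl (fun acc c => acc ++ [pvSet2d img (side - 1) (s + 1 - side) c]) acc) []

def pattern_none (image : List (List Int)) (colours : List Int) (slider : Int) : List (List (List Int)) :=
  if slider = 0 then [pvBase image]
  else if slider < 0 then
    -- tuple(map(tuple, img)) is the identity on the carried data
    (pattern_noneGo image colours (image.length * 2 + 1)).map (fun img => img.map (fun row => row))
  else
    pattern_noneGo image colours slider.toNat

-- ===== PORT B =====
-- Source B's `coords`: the border cells in slider order
def pvCoords (n : Nat) : List (Nat × Nat) :=
  (List.range n).map (fun s => (s, n)) ++ (List.range (n + 1)).map (fun c => (n, c))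

-- Source B's inner loop `for j in range(m-1, -1, -1)`: first argument = number of remaining j's
def pvAssign (coords : List (Nat × Nat)) (colours : List Int) (k : Nat) :
    Nat → List (List Int) → Nat → List (List Int)
  | 0, img, _ => img
  | j+1, img, rem =>
      pvAssign coords colours k j
        (pvSet2d img (coords.getD j (0, 0)).1 (coords.getD j (0, 0)).2
          (colours.getD (rem % k) 0)) (rem / k)

def pattern_none_alt (image : List (List Int)) (colours : List Int) (slider : Int) : List (List (List Int)) :=
  let n := image.length
  let base := pvBase image
  if slider = 0 then [base]
  else
    let coords := pvCoords n
    let m := if slider < 0 then 2 * n + 1 else slider.toNat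
    let k := colours.length
    (List.range (k ^ m)).map (fun idx =>
      let img := pvAssign coords colours k m base idx
      if slider < 0 then img.map (fun row => row) else img)

-- ===== PRECONDITION & SPEC =====
-- Pre_ admits exactly the inputs where the Python A returns: it excludes slider > 2n+1 and
-- images whose first min(slider,n) rows are shorter than n (IndexError in A's assignment),
-- and, when colours is empty, every slider other than 0 and 1 except slider<0 with an empty
-- image (A does images[0] on an empty intermediate list: IndexError).
def Pre_pattern_none (image : List (List Int)) (colours : List Int) (slider : Int) : Prop :=
  slider = 0 ∨
    (if colours = [] then (slider < 0 ∧ image = []) ∨ slider = 1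
     else slider ≤ 2 * (image.length : Int) + 1 ∧
       ∀ i ∈ List.range (min (if slider < 0 then image.length else slider.toNat) image.length),
         image.length ≤ (image.getD i []).length)
instance (image : List (List Int)) (colours : List Int) (slider : Int) : Decidable (Pre_pattern_none image colours slider) := by unfold Pre_pattern_none; infer_instance

def pvWitness_pattern_none : List (List Int) × List Int × Int := ([[5]], [1, 2], -1)

def Spec_pattern_none (image : List (List Int)) (colours : List Int) (slider : Int) (out : List (List (List Int))) : Prop := out = pattern_none_alt image colours slider
instance (image : List (List Int)) (colours : List Int) (slider : Int) (out : List (List (List Int))) : Decidable (Spec_pattern_none image colours slider out) := by unfold Spec_pattern_none; infer_instance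

-- ===== CLAIM (what is proved, stated in full; the proofs are below) =====
def Claim_equal_pattern_none : Prop := ∀ (image : List (List Int)) (colours : List Int) (slider : Int), Dom_pattern_none image colours slider → Pre_pattern_none image colours slider → Spec_pattern_none image colours slider (pattern_none image colours slider)

-- ===== LEMMAS AND PROOFS =====

theorem pvSet2d_length (img : List (List Int)) (i j : Nat) (c : Int) :
    (pvSet2d img i j c).length = img.length := by
  simp [pvSet2d]

theorem pvAssign_length (coords : List (Nat × Nat)) (colours : List Int) (k : Nat)
    (s : Nat) (img : List (List Int)) (rem : Nat) :
    (pvAssign coords colours k s img rem).length = img.length := by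
  induction s generalizing img rem with
  | zero => rfl
  | succ s ih => simp [pvAssign, ih, pvSet2d_length]

theorem pvBase_length (image : List (List Int)) :
    (pvBase image).length = image.length + 1 := by
  simp [pvBase]

theorem getD_set_ne (l : List (List Int)) (i i' : Nat) (a : List Int) (h : i ≠ i') :
    (l.set i a).getD i' [] = l.getD i' [] := by
  simp [List.getD_eq_getElem?_getD, List.getElem?_set_ne h]

theorem pvSet2d_oob (img : List (List Int)) (i j : Nat) (c : Int) (h : img.length ≤ i) :
    pvSet2d img i j c = img := by
  unfold pvSet2d
  exact List.set_eq_of_length_le h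

theorem pvSet2d_comm (img : List (List Int)) (i j i' j' : Nat) (c c' : Int)
    (h : (i, j) ≠ (i', j')) :
    pvSet2d (pvSet2d img i j c) i' j' c' = pvSet2d (pvSet2d img i' j' c') i j c := by
  by_cases hi : i = i'
  · subst hi
    have hj : j ≠ j' := by simpa using h
    by_cases hl : i < img.length
    · unfold pvSet2d
      simp [List.getD_eq_getElem?_getD, hl, List.set_set]
      rw [List.set_comm _ _ hj]
    · have e : ∀ (j0 : Nat) (c0 : Int), pvSet2d img i j0 c0 = img :=
        fun j0 c0 => pvSet2d_oob _ _ _ _ (by omega)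
      simp only [e]
  · unfold pvSet2d
    rw [getD_set_ne _ _ _ _ hi, getD_set_ne _ _ _ _ (Ne.symm hi)]
    exact List.set_comm _ _ hi

theorem coords_getD (n j : Nat) (hj : j < 2 * n + 1) :
    (pvCoords n).getD j (0, 0) = if j < n then (j, n) else (n, j - n) := by
  unfold pvCoords
  by_cases h : j < n
  · rw [List.getD_eq_getElem?_getD, List.getElem?_append_left (by simpa using h)]
    simp [h]
  · have h1 : n ≤ j := by omega
    have h2 : j - n < n + 1 := by omega
    rw [List.getD_eq_getElem?_getD, List.getElem?_append_right (by simpa using h1)]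
    simp [h, List.getElem?_range h2]

theorem coords_ne (n j s : Nat) (hj : j < 2 * n + 1) (hs : s < 2 * n + 1) (hne : j ≠ s) :
    (pvCoords n).getD j (0, 0) ≠ (pvCoords n).getD s (0, 0) := by
  rw [coords_getD n j hj, coords_getD n s hs]
  intro e
  by_cases h1 : j < n <;> by_cases h2 : s < n <;>
    simp only [h1, h2, if_true, if_false, Prod.mk.injEq] at e <;> omega

-- an assignment at coord t commutes past the assignments at coords 0..s-1 (s ≤ t < 2n+1)
theorem pvAssign_set2d_comm (n : Nat) (colours : List Int) (s t : Nat)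
    (hst : s ≤ t) (ht : t < 2 * n + 1) (img : List (List Int)) (q : Nat) (c : Int) :
    pvAssign (pvCoords n) colours colours.length s
        (pvSet2d img ((pvCoords n).getD t (0, 0)).1 ((pvCoords n).getD t (0, 0)).2 c) q
      = pvSet2d (pvAssign (pvCoords n) colours colours.length s img q)
          ((pvCoords n).getD t (0, 0)).1 ((pvCoords n).getD t (0, 0)).2 c := by
  induction s generalizing img q with
  | zero => rfl
  | succ s ih =>
    have hne := coords_ne n t s ht (by omega) (by omega)
    have hcomm := pvSet2d_comm img
      ((pvCoords n).getD t (0, 0)).1 ((pvCoords n).getD t (0, 0)).2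
      ((pvCoords n).getD s (0, 0)).1 ((pvCoords n).getD s (0, 0)).2
      c (colours.getD (q % colours.length) 0)
      (by intro e; exact hne (by rw [Prod.ext_iff] at e ⊢; exact e))
    simp only [pvAssign]
    rw [hcomm, ih (by omega)]

-- map over colours = map over range(len colours) with getD
theorem map_eq_range_getD (colours : List Int) (f : Int → List (List Int)) :
    colours.map f = (List.range colours.length).map (fun r => f (colours.getD r 0)) := by
  apply List.ext_getElem
  · simp
  · intro i h1 h2
    simp only [List.length_map] at h1
    simp [List.getD_eq_getElem?_getD, List.getElem?_eq_getElem h1]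

-- range (a*k) enumerated q-major, r-minor
theorem range_mul_map (a k : Nat) (G : Nat → List (List Int)) :
    (List.range (a * k)).map G
      = (List.range a).flatMap (fun q => (List.range k).map (fun r => G (q * k + r))) := by
  induction a with
  | zero => simp
  | succ a ih =>
    rw [Nat.succ_mul, List.range_add, List.map_append, ih, List.range_succ,
      List.flatMap_append]
    simp [List.map_map, Function.comp_def]

theorem go_nil (image : List (List Int)) (m : Nat) (hm : 1 ≤ m) :
    pattern_noneGo image [] m = [] := by
  induction m with
  | zero => omega
  | succ m ih =>
    by_cases h : m = 0
    · subst h; simp [pattern_noneGo]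
    · simp [pattern_noneGo, ih (by omega)]

-- the main invariant: level s of A = index enumeration over B's first s coords
theorem go_eq (image : List (List Int)) (colours : List Int) (hc : colours ≠ [])
    (s : Nat) (hs : s ≤ 2 * image.length + 1) :
    pattern_noneGo image colours s
      = (List.range (colours.length ^ s)).map
          (fun idx => pvAssign (pvCoords image.length) colours colours.length s (pvBase image) idx) := by
  induction s with
  | zero => simp [pattern_noneGo, pvAssign]
  | succ s ih =>
    have hs' : s ≤ 2 * image.length + 1 := by omega
    have hk : 0 < colours.length := List.length_pos_of_ne_nil hc
    have hpow : 0 < colours.length ^ s := pow_pos hk s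
    have hIH := ih hs'
    -- the head of level s and hence `side`
    have hside : ((pattern_noneGo image colours s).headD []).length = image.length + 1 := by
      rw [hIH]
      obtain ⟨t, ht⟩ : ∃ t, colours.length ^ s = t + 1 := ⟨colours.length ^ s - 1, by omega⟩
      rw [ht, List.range_succ_eq_map]
      simp [pvAssign_length, pvBase_length]
    -- the coordinate written at level s+1 is coords[s]
    have hcoord : ((pvCoords image.length).getD s (0, 0))
        = (if s + 1 < image.length + 1 then (s, image.length + 1 - 1)
           else (image.length + 1 - 1, s + 1 - (image.length + 1))) := by
      rw [coords_getD image.length s (by omega)]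
      by_cases h : s < image.length
      · simp [h]
      · simp [h]
    -- A's level step, as a flatMap over the coord coords[s]
    have step : pattern_noneGo image colours (s + 1)
        = (pattern_noneGo image colours s).flatMap (fun img =>
            colours.map (fun c =>
              pvSet2d img ((pvCoords image.length).getD s (0, 0)).1
                ((pvCoords image.length).getD s (0, 0)).2 c)) := by
      show (let images := pattern_noneGo image colours s
            let side := (images.headD []).length
            if s + 1 < side then
              images.foldl (fun acc img =>
                colours.foldl (fun acc c => acc ++ [pvSet2d img s (side - 1) c]) acc) []
            else
              images.foldl (fun acc img =>
                colours.foldl (fun acc c => acc ++ [pvSet2d img (side - 1) (s + 1 - side) c]) acc) []) = _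
      simp only [hside, hcoord]
      by_cases h : s + 1 < image.length + 1 <;>
        simp only [h, if_true, if_false, PySem.List.foldl_append_singleton_eq_map,
          PySem.List.foldl_append_eq_flatMap, List.nil_append]
    have inner : ∀ q : Nat,
        colours.map (fun c =>
          pvSet2d (pvAssign (pvCoords image.length) colours colours.length s (pvBase image) q)
            ((pvCoords image.length).getD s (0, 0)).1 ((pvCoords image.length).getD s (0, 0)).2 c)
      = (List.range colours.length).map (fun r =>
          pvAssign (pvCoords image.length) colours colours.length (s + 1) (pvBase image)
            (q * colours.length + r)) := by
      intro q
      rw [map_eq_range_getD]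
      refine List.map_congr_left (fun r hr => ?_)
      rw [List.mem_range] at hr
      have hmod : (q * colours.length + r) % colours.length = r := by
        rw [mul_comm, Nat.mul_add_mod, Nat.mod_eq_of_lt hr]
      have hdiv : (q * colours.length + r) / colours.length = q := by
        rw [mul_comm, Nat.mul_add_div hk, Nat.div_eq_of_lt hr, Nat.add_zero]
      simp only [pvAssign, hmod, hdiv]
      exact (pvAssign_set2d_comm image.length colours s s le_rfl (by omega) (pvBase image) q
        (colours.getD r 0)).symm
    rw [step, hIH, List.flatMap_map, pow_succ, range_mul_map]
    exact congrArg (fun f => List.flatMap f (List.range (colours.length ^ s))) (funext inner)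

-- ===== VERDICT (by name: the statement is the Claim_ definition above) =====
theorem pattern_none_spec : Claim_equal_pattern_none := by
  intro image colours slider _ hpre
  show pattern_none image colours slider = pattern_none_alt image colours slider
  by_cases h0 : slider = 0
  · simp [pattern_none, pattern_none_alt, h0]
  · by_cases hc : colours = []
    · -- with no colours both sides are [] for every slider ≠ 0
      subst hc
      unfold pattern_none pattern_none_alt
      by_cases hneg : slider < 0
      · rw [if_neg h0, if_neg h0, if_pos hneg, if_pos hneg, go_nil _ _ (by omega)]
        simp [Nat.zero_pow (show 0 < 2 * image.length + 1 by omega)]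
      · have ht : 1 ≤ slider.toNat := by omega
        rw [if_neg h0, if_neg h0, if_neg hneg, if_neg hneg, go_nil _ _ ht]
        simp [Nat.zero_pow (show 0 < slider.toNat by omega)]
    · rcases hpre with h | hpre
      · exact absurd h h0
      rw [if_neg hc] at hpre
      obtain ⟨hle, -⟩ := hpre
      unfold pattern_none pattern_none_alt
      by_cases hneg : slider < 0
      · rw [if_neg h0, if_neg h0, if_pos hneg]
        have e : image.length * 2 + 1 = 2 * image.length + 1 := by ring
        rw [e, go_eq image colours hc _ le_rfl]
        simp [hneg, List.map_map, Function.comp_def]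
      · rw [if_neg h0, if_neg h0, if_neg hneg]
        have hm : slider.toNat ≤ 2 * image.length + 1 := by omega
        rw [go_eq image colours hc _ hm]
        simp [hneg]
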